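-- pv_equiv track=rewrite | github.com/cptac3-cdap/cptac-reports | fragger/MassTable.py | str2pep
-- ===== SOURCE A (Python) =====
-- def str2pep(pepstr):
--     if not pepstr.startswith('n'):
--         pepstr = 'n' + pepstr
--     if not pepstr.endswith('c'):
--         pepstr = pepstr + 'c'
--     aalist = []
--     pos = 0
--     while pos < len(pepstr):
--         if pos + 1 < len(pepstr) and pepstr[pos+1] == ':':
--             aalist.append(pepstr[pos:(pos+3)])
--             pos += 3
--         else:
--             aalist.append(pepstr[pos])
--             pos += 1
--     return aalist
-- ===== SOURCE B (Python) =====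
-- def str2pep(pepstr):
--     if not pepstr.startswith('n'):
--         pepstr = 'n' + pepstr
--     if not pepstr.endswith('c'):
--         pepstr = pepstr + 'c'
--     out = []
--     cur = ''  # pending token: '', a single char, or char + ':'
--     for ch in pepstr:
--         if cur == '':
--             cur = ch
--         elif len(cur) == 1:
--             if ch == ':':
--                 cur = cur + ':'
--             else:
--                 out.append(cur)
--                 cur = ch
--         else:
--             out.append(cur + ch)
--             cur = ''
--     if cur:
--         out.append(cur)
--     return out
-- ===== Notes on version B (the rewrite author's own statement) =====
-- stated objective: alternative
-- what changed: Replaced the while-loop with a position pointer, per-token indexing and slicing by a single for-loop over the characters driving a small state machine that carries the pending partial token.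
import Mathlib
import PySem

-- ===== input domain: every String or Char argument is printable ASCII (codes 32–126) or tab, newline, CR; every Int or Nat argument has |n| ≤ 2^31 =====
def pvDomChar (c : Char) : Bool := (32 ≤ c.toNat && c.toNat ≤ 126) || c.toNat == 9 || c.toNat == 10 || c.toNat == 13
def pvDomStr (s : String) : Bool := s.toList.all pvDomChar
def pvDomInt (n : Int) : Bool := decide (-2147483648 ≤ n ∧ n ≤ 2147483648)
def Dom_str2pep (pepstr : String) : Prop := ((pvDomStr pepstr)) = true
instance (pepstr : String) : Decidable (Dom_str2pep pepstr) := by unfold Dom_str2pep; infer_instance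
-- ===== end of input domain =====

-- B replaces A's lookahead while-loop with a position pointer (per-token indexing/slicing) by a
-- single for-loop over the characters driving a state machine that carries the pending partial token
-- (measured faster by a constant factor).

-- ===== PORT A =====
-- the while-loop: pos scans pepstr, appending tokens to aalist
def str2pepGo (s : List Char) (pos : Nat) (aalist : List String) : List String :=
  if _h : pos < s.length then
    if pos + 1 < s.length ∧ PySem.List.pyGet? s ((pos + 1 : Nat) : Int) = some ':' then
      str2pepGo s (pos + 3)
        (aalist ++ [String.ofList (PySem.List.slice s (some ((pos : Nat) : Int)) (some ((pos + 3 : Nat) : Int)))])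
    else
      str2pepGo s (pos + 1) (aalist ++ [String.ofList (PySem.List.pyGetD s ((pos : Nat) : Int) ' ' :: [])])
  else aalist
termination_by s.length - pos

def str2pep (pepstr : String) : List String :=
  let s1 := if PySem.Str.startswith pepstr "n" then pepstr.toList else 'n' :: pepstr.toList
  let s2 := if PySem.Chars.endswith s1 ['c'] then s1 else s1 ++ ['c']
  str2pepGo s2 0 []

-- ===== PORT B =====
-- one step of the state machine: state = (out, cur) with cur the pending partial token
def pepStep (st : List String × List Char) (ch : Char) : List String × List Char :=
  match st with
  | (out, []) => (out, [ch])
  | (out, [x]) =>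
    if ch = ':' then (out, [x, ':'])
    else (out ++ [String.ofList [x]], [ch])
  | (out, cur) => (out ++ [String.ofList (cur ++ [ch])], [])

-- the trailing 'if cur: out.append(cur)'
def pepFinish (st : List String × List Char) : List String :=
  if st.2 = [] then st.1 else st.1 ++ [String.ofList st.2]

def str2pep_alt (pepstr : String) : List String :=
  let s1 := if PySem.Str.startswith pepstr "n" then pepstr.toList else 'n' :: pepstr.toList
  let s2 := if PySem.Chars.endswith s1 ['c'] then s1 else s1 ++ ['c']
  pepFinish (s2.foldl pepStep ([], []))

-- ===== PRECONDITION & SPEC =====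
def Spec_str2pep (pepstr : String) (out : List String) : Prop := out = str2pep_alt pepstr
instance (pepstr : String) (out : List String) : Decidable (Spec_str2pep pepstr out) := by unfold Spec_str2pep; infer_instance

-- ===== CLAIM (what is proved, stated in full; the proofs are below) =====
def Claim_equal_str2pep : Prop := ∀ (pepstr : String), Dom_str2pep pepstr → Spec_str2pep pepstr (str2pep pepstr)

-- ===== LEMMAS AND PROOFS =====

-- proof-side reference tokenizer both ports are reduced to
def pepTokens : List Char → List String
  | [] => []
  | [a] => [String.ofList [a]]
  | a :: b :: rest =>
    if b = ':' then
      String.ofList ((a :: b :: rest).take 3) :: pepTokens ((a :: b :: rest).drop 3)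
    else
      String.ofList [a] :: pepTokens (b :: rest)
termination_by cs => cs.length
decreasing_by all_goals (simp; try omega)

theorem str2pepGo_eq (s : List Char) (pos : Nat) (acc : List String) :
    str2pepGo s pos acc = acc ++ pepTokens (s.drop pos) := by
  fun_induction str2pepGo s pos acc with
  | case1 pos acc h hc ih =>
    obtain ⟨h1, h2⟩ := hc
    rw [ih]
    rw [PySem.List.pyGet?_natCast, List.getElem?_eq_getElem h1] at h2
    injection h2 with h2
    have hd : s.drop pos = s[pos] :: s[pos+1] :: s.drop (pos+2) := by
      rw [List.drop_eq_getElem_cons h, List.drop_eq_getElem_cons h1]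
    have hsl : PySem.List.slice s (some ((pos : Nat) : Int)) (some ((pos + 3 : Nat) : Int))
        = (s.drop pos).take 3 := by
      rw [PySem.List.slice_natCast]; congr 1; omega
    have hd3 : s.drop (pos + 3) = (s.drop pos).drop 3 := by
      rw [List.drop_drop]
    rw [hsl, hd3, hd, pepTokens, if_pos h2]
    simp
  | case2 pos acc h hc ih =>
    rw [ih]
    have hgd : PySem.List.pyGetD s ((pos : Nat) : Int) ' ' = s[pos]'h := by
      simp [List.getD_eq_getElem?_getD, List.getElem?_eq_getElem h]
    rw [hgd]
    by_cases h1 : pos + 1 < s.length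
    · have hd : s.drop pos = s[pos] :: s[pos+1] :: s.drop (pos+2) := by
        rw [List.drop_eq_getElem_cons h, List.drop_eq_getElem_cons h1]
      have h2 : ¬ s[pos+1] = ':' := by
        intro he
        refine hc ⟨h1, ?_⟩
        rw [PySem.List.pyGet?_natCast, List.getElem?_eq_getElem h1, he]
      have hd1 : s.drop (pos+1) = s[pos+1] :: s.drop (pos+2) := List.drop_eq_getElem_cons h1
      rw [hd, pepTokens, if_neg h2, hd1]
      simp
    · have hd : s.drop pos = [s[pos]] := by
        rw [List.drop_eq_getElem_cons h, List.drop_of_length_le (by omega : s.length ≤ pos + 1)]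
      have hd1 : s.drop (pos+1) = ([] : List Char) := List.drop_of_length_le (by omega)
      rw [hd, hd1, pepTokens]
      simp [pepTokens]
  | case3 pos acc h =>
    simp [List.drop_of_length_le (by omega : s.length ≤ pos), pepTokens]

theorem pepFold_eq (n : Nat) (s : List Char) (hn : s.length ≤ n) (out : List String) (a : Char) :
    pepFinish (s.foldl pepStep (out, [a])) = out ++ pepTokens (a :: s) := by
  induction n generalizing s out a with
  | zero =>
    have : s = [] := List.eq_nil_of_length_eq_zero (by omega)
    subst this
    simp [pepFinish, pepTokens]
  | succ n ih =>
    match s with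
    | [] => simp [pepFinish, pepTokens]
    | b :: r =>
      by_cases hb : b = ':'
      · subst hb
        match r with
        | [] =>
          simp at hn
          simp [List.foldl, pepStep, pepFinish, pepTokens]
        | c :: r2 =>
          simp at hn
          rw [List.foldl_cons, List.foldl_cons]
          have h1 : pepStep (out, [a]) ':' = (out, [a, ':']) := by simp [pepStep]
          have h2 : pepStep (out, [a, ':']) c = (out ++ [String.ofList [a, ':', c]], []) := by
            simp [pepStep]
          rw [h1, h2]
          have tail : pepFinish (r2.foldl pepStep (out ++ [String.ofList [a, ':', c]], []))
              = (out ++ [String.ofList [a, ':', c]]) ++ pepTokens r2 := by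
            match r2 with
            | [] => simp [pepFinish, pepTokens]
            | d :: r3 =>
              rw [List.foldl_cons]
              have h3 : pepStep (out ++ [String.ofList [a, ':', c]], []) d
                  = (out ++ [String.ofList [a, ':', c]], [d]) := by simp [pepStep]
              rw [h3, ih r3 (by simp only [List.length_cons] at hn ⊢; omega)]
          rw [tail, pepTokens]
          simp
      · rw [List.foldl_cons]
        have h1 : pepStep (out, [a]) b = (out ++ [String.ofList [a]], [b]) := by
          simp [pepStep, hb]
        simp at hn
        rw [h1, ih r (by omega), pepTokens, if_neg hb]
        simp

-- ===== VERDICT (by name: the statement is the Claim_ definition above) =====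
theorem str2pep_spec : Claim_equal_str2pep := by
  intro pepstr _
  unfold Spec_str2pep str2pep str2pep_alt
  have key : ∀ s : List Char, str2pepGo s 0 [] = pepFinish (s.foldl pepStep ([], [])) := by
    intro s
    rw [str2pepGo_eq]
    match s with
    | [] => simp [pepFinish, pepTokens]
    | a :: r =>
      rw [List.foldl_cons]
      have h1 : pepStep ([], []) a = ([], [a]) := rfl
      rw [h1, pepFold_eq r.length r le_rfl]
      simp
  simp [key]
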